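-- pv_equiv track=rewrite | github.com/SRV-JSPA/Construcci-n-Directa-de-AFD-y-ecosistema-de-reconocimiento-de-expresiones-regulares | afn.py | caracteres_escapados_afn
-- ===== SOURCE A (Python) =====
-- def caracteres_escapados_afn(cadena):
--     cadena = cadena.replace(' ', '')
--     nueva_cadena = ''
--     escape = False
--     for char in cadena:
--         if escape:
--             nueva_cadena += '#' + char
--             escape = False
--         else:
--             if char == '\\':
--                 escape = True
--             else:
--                 nueva_cadena += char
--     return nueva_cadena
-- ===== SOURCE B (Python) =====
-- def caracteres_escapados_afn(cadena):
--     # staged passes: strip spaces, split on backslash, then glue the pieces back,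
--     # prefixing the first char after each backslash with '#'
--     s = cadena.replace(' ', '')
--     pieces = s.split('\\')
--     out = [pieces[0]]
--     rest = pieces[1:]
--     while rest:
--         p = rest[0]
--         if p:                      # backslash escaped an ordinary char: it is p[0]
--             out.append('#' + p)
--             rest = rest[1:]
--         elif len(rest) >= 2:       # empty piece: the backslash escaped another backslash
--             out.append('#\\' + rest[1])
--             rest = rest[2:]
--         else:                      # trailing lone backslash: nothing to escape
--             rest = []
--     return ''.join(out)
-- ===== Notes on version B (the rewrite author's own statement) =====
-- stated objective: faster
-- what changed: Replaces A's boolean escape-flag character-by-character scan with staged passes: strip spaces, split the string on backslash with str.split, then glue the pieces back, prefixing '#' to the first character after each backslash (an empty piece meaning an escaped backslash).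
import Mathlib
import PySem

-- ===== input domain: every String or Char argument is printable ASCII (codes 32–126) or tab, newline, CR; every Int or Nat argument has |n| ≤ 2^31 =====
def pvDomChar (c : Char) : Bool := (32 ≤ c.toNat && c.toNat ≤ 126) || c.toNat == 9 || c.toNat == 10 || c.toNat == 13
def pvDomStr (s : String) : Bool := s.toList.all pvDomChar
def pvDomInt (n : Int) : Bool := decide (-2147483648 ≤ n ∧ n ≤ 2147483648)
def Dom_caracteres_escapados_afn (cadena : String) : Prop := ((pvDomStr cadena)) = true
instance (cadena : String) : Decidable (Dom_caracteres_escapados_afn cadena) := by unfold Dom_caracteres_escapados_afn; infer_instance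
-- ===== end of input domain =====

-- B replaces A's boolean escape-flag character scan by staged passes: strip spaces,
-- split on backslash, then glue the pieces back with '#' before each escaped char (alternative).

-- ===== PORT A =====
-- A's loop body: append with '#' if the escape flag is set, else set the flag on '\' or append.
def pvStepA (st : List Char × Bool) (char : Char) : List Char × Bool :=
  if st.2 then (st.1 ++ ['#', char], false)
  else if char = '\\' then (st.1, true)
  else (st.1 ++ [char], false)

-- A: strip spaces, then scan char by char with an 'escape' flag, accumulating the output.
def caracteres_escapados_afn (cadena : String) : String :=
  String.ofList ((PySem.Str.replace cadena " " "").toList.foldl pvStepA ([], false)).1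

-- ===== PORT B =====
-- Source B's while loop over the remaining pieces, as structural recursion on that list:
-- a nonempty piece p contributes '#'+p; an empty piece means the backslash escaped a
-- backslash, contributing '#\'+next piece; a final empty piece is a trailing lone backslash.
def pvGlueRest : List (List Char) → List Char
  | [] => []
  | p :: r =>
    if p ≠ [] then ('#' :: p) ++ pvGlueRest r
    else match r with
      | [] => []
      | q :: r' => ('#' :: '\\' :: q) ++ pvGlueRest r'

-- B: strip spaces, split on '\' (Python str.split with a one-char separator = List.splitOn),
-- emit the first piece as is, then glue the rest.
def caracteres_escapados_afn_alt (cadena : String) : String :=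
  match (PySem.Str.replace cadena " " "").toList.splitOn '\\' with
  | [] => ""                 -- unreachable: split always yields at least one piece
  | p :: r => String.ofList (p ++ pvGlueRest r)

-- ===== PRECONDITION & SPEC =====
def Spec_caracteres_escapados_afn (cadena : String) (out : String) : Prop := out = caracteres_escapados_afn_alt cadena
instance (cadena : String) (out : String) : Decidable (Spec_caracteres_escapados_afn cadena out) := by unfold Spec_caracteres_escapados_afn; infer_instance

-- ===== CLAIM (what is proved, stated in full; the proofs are below) =====
def Claim_equal_caracteres_escapados_afn : Prop := ∀ (cadena : String), Dom_caracteres_escapados_afn cadena → Spec_caracteres_escapados_afn cadena (caracteres_escapados_afn cadena)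

-- ===== LEMMAS AND PROOFS =====

-- the value of A's scan starting in the non-escape state, as a recursion (proof device)
def pvScanA : List Char → List Char
  | [] => []
  | c :: rest =>
    if c = '\\' then
      match rest with
      | [] => []
      | d :: r => '#' :: d :: pvScanA r
    else c :: pvScanA rest

-- the value of A's scan when the flag is set
def pvEsc : List Char → List Char
  | [] => []
  | c :: r => '#' :: c :: pvScanA r

theorem pvLoop_eq (l : List Char) : ∀ acc : List Char,
    (l.foldl pvStepA (acc, false)).1 = acc ++ pvScanA l
    ∧ (l.foldl pvStepA (acc, true)).1 = acc ++ pvEsc l := by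
  induction l with
  | nil => intro acc; simp [pvScanA, pvEsc]
  | cons c r ih =>
    intro acc
    constructor
    · by_cases hc : c = '\\'
      · subst hc
        rw [List.foldl_cons, show pvStepA (acc, false) '\\' = (acc, true) from by simp [pvStepA],
          (ih acc).2]
        cases r with
        | nil => simp [pvScanA, pvEsc]
        | cons d r' => simp [pvScanA, pvEsc]
      · rw [List.foldl_cons, show pvStepA (acc, false) c = (acc ++ [c], false) from by simp [pvStepA, hc],
          (ih (acc ++ [c])).1]
        conv_rhs => rw [pvScanA.eq_def]
        simp [hc]
    · rw [List.foldl_cons, show pvStepA (acc, true) c = (acc ++ ['#', c], false) from by simp [pvStepA],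
        (ih (acc ++ ['#', c])).1]
      simp [pvEsc]

theorem pvSplitOn_ne_nil (l : List Char) : l.splitOn '\\' ≠ [] := by
  induction l with
  | nil => simp [List.splitOn, List.splitOnP_nil]
  | cons c r ih =>
    unfold List.splitOn at *
    rw [List.splitOnP_cons]
    split
    · simp
    · cases h : r.splitOnP (· == '\\') with
      | nil => exact absurd h ih
      | cons q r' => simp [List.modifyHead]

-- glueing the split pieces recomputes A's scan
theorem pvGlue_eq (l : List Char) :
    (match l.splitOn '\\' with
     | [] => []
     | p :: r => p ++ pvGlueRest r) = pvScanA l := by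
  induction l using pvScanA.induct with
  | case1 => simp [List.splitOn, List.splitOnP_nil, pvScanA, pvGlueRest]
  | case2 =>
    -- l = ['\\']
    simp [List.splitOn, List.splitOnP_cons, List.splitOnP_nil, pvScanA, pvGlueRest]
  | case3 d r ih =>
    -- l = '\\' :: d :: r
    by_cases hd : d = '\\'
    · subst hd
      have hne := pvSplitOn_ne_nil r
      cases h : r.splitOn '\\' with
      | nil => exact absurd h hne
      | cons q r' =>
        unfold List.splitOn at *
        rw [List.splitOnP_cons, List.splitOnP_cons]
        simp only [beq_self_eq_true, if_true, h]
        rw [h] at ih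
        simp [pvScanA, pvGlueRest, ← ih]
    · have hne := pvSplitOn_ne_nil r
      cases h : r.splitOn '\\' with
      | nil => exact absurd h hne
      | cons q r' =>
        unfold List.splitOn at *
        rw [List.splitOnP_cons, List.splitOnP_cons]
        have : (d == '\\') = false := by simp [hd]
        simp only [beq_self_eq_true, if_true, this, h, List.modifyHead]
        rw [h] at ih
        simp only [pvScanA, ← ih]
        conv_lhs => rw [pvGlueRest.eq_def]
        simp
  | case4 c rest hc ih =>
    -- l = c :: rest, c ≠ '\\'
    have hne := pvSplitOn_ne_nil rest
    cases h : rest.splitOn '\\' with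
    | nil => exact absurd h hne
    | cons q r' =>
      unfold List.splitOn at *
      rw [List.splitOnP_cons]
      have : (c == '\\') = false := by simp [hc]
      simp only [this, h, List.modifyHead]
      rw [h] at ih
      conv_rhs => rw [pvScanA.eq_def]
      simp [hc, ← ih]

-- ===== VERDICT (by name: the statement is the Claim_ definition above) =====
theorem caracteres_escapados_afn_spec : Claim_equal_caracteres_escapados_afn := by
  intro cadena _
  unfold Spec_caracteres_escapados_afn caracteres_escapados_afn caracteres_escapados_afn_alt
  rw [(pvLoop_eq (PySem.Str.replace cadena " " "").toList []).1, List.nil_append,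
    ← pvGlue_eq (PySem.Str.replace cadena " " "").toList]
  cases h : (PySem.Str.replace cadena " " "").toList.splitOn '\\' <;> simp
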